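-- pv_equiv track=rewrite | github.com/Keren-BenArie/Mouse-Tracking-Experiment | cta_processing.py | flips_single_trial_count
-- ===== SOURCE A (Python) =====
-- def flips_single_trial_count(x_axes, y_axes):
--     bigger, smaller = False, False
--     x_count, y_count = 0, 0
--     last_i = 0
--     for i in range(1, len(x_axes)):
--         if x_axes[last_i] >= x_axes[i]:
--             if not bigger:
--                 bigger = True
--                 smaller = False
--                 x_count += 1
--             else:
--                 continue
--         if x_axes[last_i] < x_axes[i]:
--             if not smaller:
--                 bigger = False
--                 smaller = True
--                 x_count += 1
--             else:
--                 continue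
--
--     bigger, smaller = False, False
--     last_i = 0
--     for i in range(1, len(y_axes)):
--         if y_axes[last_i] >= y_axes[i]:
--             if not bigger:
--                 bigger = True
--                 smaller = False
--                 y_count += 1
--             else:
--                 continue
--         if y_axes[last_i] < y_axes[i]:
--             if not smaller:
--                 bigger = False
--                 smaller = True
--                 y_count += 1
--             else:
--                 continue
--
--     return x_count, y_count
-- ===== SOURCE B (Python) =====
-- def flips_single_trial_count(x_axes, y_axes):
--     # Map each later element to a direction label relative to the first element,
--     # then count maximal runs of equal labels (= 1 + number of adjacent label changes).
--     def runs(s):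
--         labels = [s[0] >= v for v in s[1:]]
--         if not labels:
--             return 0
--         return 1 + sum(a != b for a, b in zip(labels, labels[1:]))
--     return runs(x_axes), runs(y_axes)
-- ===== Notes on version B (the rewrite author's own statement) =====
-- stated objective: simpler
-- what changed: Replaces the stateful bigger/smaller toggle loop (which in fact always compares against element 0, since last_i is never updated) by a stateless map to direction labels s[0]>=s[i] followed by counting maximal equal runs via adjacent-pair comparisons.
import Mathlib
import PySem

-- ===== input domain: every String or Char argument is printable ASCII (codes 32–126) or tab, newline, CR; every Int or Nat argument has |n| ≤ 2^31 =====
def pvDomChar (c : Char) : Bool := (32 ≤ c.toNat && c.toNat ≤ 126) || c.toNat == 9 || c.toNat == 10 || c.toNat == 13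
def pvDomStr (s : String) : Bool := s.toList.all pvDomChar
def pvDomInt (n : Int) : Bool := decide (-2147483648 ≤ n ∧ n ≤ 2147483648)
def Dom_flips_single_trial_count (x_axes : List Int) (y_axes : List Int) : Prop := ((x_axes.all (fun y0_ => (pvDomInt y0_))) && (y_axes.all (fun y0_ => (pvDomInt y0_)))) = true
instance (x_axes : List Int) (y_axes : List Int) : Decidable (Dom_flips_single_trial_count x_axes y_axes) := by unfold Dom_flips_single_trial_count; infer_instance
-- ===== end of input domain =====

-- B replaces A's stateful bigger/smaller toggle with a stateless map to
-- direction labels (s[0] >= s[i]) followed by counting maximal equal runs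
-- (objective: simpler; same asymptotic cost).


-- ===== PORT A =====
-- one loop iteration of A (bigger, smaller, count); `continue` skips the rest of the body
def pvStepA (h0 : Int) (st : Bool × Bool × Int) (v : Int) : Bool × Bool × Int :=
  let bigger := st.1
  let smaller := st.2.1
  let count := st.2.2
  if h0 ≥ v then
    if !bigger then
      -- bigger, smaller, count := True, False, count+1; then fall through to the second `if`
      if h0 < v then
        if !false then (false, true, (count + 1) + 1) else (true, false, count + 1)
      else (true, false, count + 1)
    else st  -- continue
  else
    if h0 < v then
      if !smaller then (false, true, count + 1) else st  -- continue
    else st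

-- one of A's two identical loops: for i in range(1, len(s)), comparing s[last_i] (= s[0]) with s[i]
def pvAxisA (s : List Int) : Int :=
  ((PySem.List.pyRange 1 (s.length : Int) 1).foldl
    (fun st i => pvStepA (PySem.List.pyGetD s 0 0) st (PySem.List.pyGetD s i 0))
    (false, false, 0)).2.2

def flips_single_trial_count (x_axes : List Int) (y_axes : List Int) : Int × Int :=
  (pvAxisA x_axes, pvAxisA y_axes)

-- ===== PORT B =====
-- sum(a != b for a, b in zip(labels, labels[1:]))
def pvChanges (pairs : List (Bool × Bool)) : Int :=
  (pairs.map (fun ab => if ab.1 ≠ ab.2 then (1 : Int) else 0)).sum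

-- labels = [s[0] >= v for v in s[1:]]; 0 if empty else 1 + adjacent changes
def pvRuns (s : List Int) : Int :=
  let labels : List Bool := match s with
    | [] => []
    | h :: t => t.map (fun v => decide (h ≥ v))
  if labels = [] then 0 else 1 + pvChanges (labels.zip labels.tail)

def flips_single_trial_count_alt (x_axes : List Int) (y_axes : List Int) : Int × Int :=
  (pvRuns x_axes, pvRuns y_axes)

-- ===== PRECONDITION & SPEC =====
def Spec_flips_single_trial_count (x_axes : List Int) (y_axes : List Int) (out : Int × Int) : Prop := out = flips_single_trial_count_alt x_axes y_axes
instance (x_axes : List Int) (y_axes : List Int) (out : Int × Int) : Decidable (Spec_flips_single_trial_count x_axes y_axes out) := by unfold Spec_flips_single_trial_count; infer_instance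

-- ===== CLAIM (what is proved, stated in full; the proofs are below) =====
def Claim_equal_flips_single_trial_count : Prop := ∀ (x_axes : List Int) (y_axes : List Int), Dom_flips_single_trial_count x_axes y_axes → Spec_flips_single_trial_count x_axes y_axes (flips_single_trial_count x_axes y_axes)

-- ===== LEMMAS AND PROOFS =====

-- change count relative to a previous label
def pvChg : Bool → List Bool → Int
  | _, [] => 0
  | p, l :: t => (if l ≠ p then 1 else 0) + pvChg l t

theorem pvStepA_char (h0 v : Int) (b : Bool) (c : Int) :
    pvStepA h0 (b, !b, c) v =
      if decide (h0 ≥ v) = b then (b, !b, c)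
      else (decide (h0 ≥ v), !(decide (h0 ≥ v)), c + 1) := by
  cases b <;> by_cases hv : h0 ≥ v <;>
    simp [pvStepA, hv]

theorem pvFoldA (h0 : Int) (t : List Int) : ∀ (b : Bool) (c : Int),
    (t.foldl (fun st v => pvStepA h0 st v) (b, !b, c)).2.2
      = c + pvChg b (t.map (fun v => decide (h0 ≥ v))) := by
  induction t with
  | nil => intro b c; simp [pvChg]
  | cons v t ih =>
    intro b c
    simp only [List.foldl_cons, List.map_cons, pvStepA_char, pvChg]
    by_cases h : decide (h0 ≥ v) = b
    · simp [h, ih b c]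
    · simp [h, ih (decide (h0 ≥ v)) (c + 1)]
      omega

theorem pvZipChanges (rest : List Bool) : ∀ (l : Bool),
    pvChanges ((l :: rest).zip rest) = pvChg l rest := by
  induction rest with
  | nil => intro l; simp [pvChanges, pvChg]
  | cons r rs ih =>
    intro l
    simp only [List.zip_cons_cons, pvChanges, List.map_cons, List.sum_cons, pvChg]
    have := ih r
    simp only [pvChanges] at this
    rw [this]
    by_cases h : l = r
    · simp [h]
    · simp [h, Ne.symm h]

theorem pvAxis_eq (s : List Int) : pvAxisA s = pvRuns s := by
  cases s with
  | nil => simp [pvAxisA, pvRuns, PySem.List.pyRange_one_eq_nil]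
  | cons h t =>
    have hfold := PySem.List.foldl_pyRange_pyGetD' (xs := h :: t) (a := 1) (d := 0)
      (f := fun st v => pvStepA (PySem.List.pyGetD (h :: t) 0 0) st v)
      (init := ((false, false, 0) : Bool × Bool × Int)) (by norm_num)
    have h0 : PySem.List.pyGetD (h :: t) 0 0 = h := by
      simp [PySem.List.pyGetD, PySem.List.pyGet?, PySem.List.pyIdx?]
    unfold pvAxisA
    rw [hfold]
    simp only [h0]
    norm_num
    cases t with
    | nil => simp [pvRuns]
    | cons v t' =>
      have hfirst : pvStepA h (false, false, 0) v
          = (decide (h ≥ v), !(decide (h ≥ v)), 1) := by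
        by_cases hv : h ≥ v <;> simp [pvStepA, hv, lt_iff_not_ge.mpr]
      simp only [List.foldl_cons, hfirst, pvFoldA]
      simp only [pvRuns, List.map_cons]
      rw [List.tail_cons, pvZipChanges]
      simp

-- ===== VERDICT (by name: the statement is the Claim_ definition above) =====
theorem flips_single_trial_count_spec : Claim_equal_flips_single_trial_count := by
  intro x y _
  unfold Spec_flips_single_trial_count flips_single_trial_count flips_single_trial_count_alt
  rw [pvAxis_eq, pvAxis_eq]
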